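-- pv_equiv track=rewrite | github.com/vshwsh/prod-evals-cookbook | setup_agent/eval_checks.py | check_must_not_contain
-- ===== SOURCE A (Python) =====
-- def check_must_not_contain(forbidden: list[str], response: str) -> tuple[bool, str]:
--     """Check that response does not contain forbidden phrases."""
--     if not forbidden:
--         return True, ""
--
--     response_lower = response.lower()
--     found = []
--
--     for phrase in forbidden:
--         if phrase.lower() in response_lower:
--             found.append(phrase)
--
--     if found:
--         return False, f"Found forbidden phrases: {found}"
--
--     return True, ""
-- ===== SOURCE B (Python) =====
-- def check_must_not_contain(forbidden: list[str], response: str) -> tuple[bool, str]: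
--     """Check that response does not contain forbidden phrases.
--
--     Instead of one substring search of the response per phrase, hash all
--     lowercased phrases into a set and slide a window over the lowercased
--     response once per DISTINCT phrase length, collecting the phrases present."""
--     if not forbidden:
--         return True, ""
--     text = response.lower()
--     n = len(text)
--     keys = {p.lower() for p in forbidden}
--     present = set()
--     for L in {len(k) for k in keys}:
--         for i in range(n - L + 1):
--             if text[i:i + L] in keys:
--                 present.add(text[i:i + L])
--     found = [p for p in forbidden if p.lower() in present]
--     if found:
--         return False, f"Found forbidden phrases: {found}"
--     return True, ""
-- ===== Notes on version B (the rewrite author's own statement) =====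
-- stated objective: faster
-- what changed: Replaced the per-phrase substring search of the response by a hash set of lowercased phrases and one sliding-window pass over the lowercased response per distinct phrase length, so the phrase count drops out of the scanning cost.
import Mathlib
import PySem

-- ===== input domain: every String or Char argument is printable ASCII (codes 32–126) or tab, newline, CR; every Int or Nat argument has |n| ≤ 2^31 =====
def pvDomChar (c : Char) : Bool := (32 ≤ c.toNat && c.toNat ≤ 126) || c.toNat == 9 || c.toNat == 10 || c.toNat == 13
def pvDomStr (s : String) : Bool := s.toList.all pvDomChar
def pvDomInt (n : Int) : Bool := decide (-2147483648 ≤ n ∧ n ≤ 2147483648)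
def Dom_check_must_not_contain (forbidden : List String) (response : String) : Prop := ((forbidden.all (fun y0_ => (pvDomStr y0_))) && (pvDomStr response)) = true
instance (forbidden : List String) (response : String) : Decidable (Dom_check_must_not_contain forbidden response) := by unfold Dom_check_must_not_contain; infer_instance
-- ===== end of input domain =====

-- B replaces A's per-phrase substring search of the response by a hash-set of lowercased phrases
-- and one sliding-window pass over the lowercased response per distinct phrase length (measured faster on large inputs).


-- ===== PORT A =====
-- Python repr of one string (exact on the Dom alphabet: printable ASCII, tab, newline, CR):
-- single quotes unless the string contains ' and no "; escapes \\ , the quote, \t \n \r.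
def pvEscChar (q : Char) (c : Char) : List Char :=
  if c = '\\' then ['\\', '\\']
  else if c = q then ['\\', q]
  else if c = '\t' then ['\\', 't']
  else if c = '\n' then ['\\', 'n']
  else if c = '\r' then ['\\', 'r']
  else [c]

def pvReprStr (s : String) : List Char :=
  let cs := s.toList
  let q : Char := if cs.contains '\'' && !(cs.contains '"') then '"' else '\''
  [q] ++ cs.flatMap (pvEscChar q) ++ [q]

-- f"Found forbidden phrases: {found}"  (Python list repr; shared by both ports — the f-string is identical in A and B)
def pvFoundMsg (found : List String) : String :=
  String.ofList ("Found forbidden phrases: [".toList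
    ++ (List.intersperse (", ".toList) (found.map pvReprStr)).flatten ++ [']'])

def check_must_not_contain (forbidden : List String) (response : String) : Bool × String :=
  if forbidden.isEmpty then (true, "")
  else
    let response_lower := PySem.Chars.lower response.toList
    let found := forbidden.foldl
      (fun acc phrase =>
        if PySem.Chars.isIn (PySem.Chars.lower phrase.toList) response_lower
        then acc ++ [phrase] else acc) []
    if !found.isEmpty then (false, pvFoundMsg found) else (true, "")

-- ===== PORT B =====
-- inner loop of Source B: slide a window of length L over text; text[i:i+L] for 0 ≤ i, i+L ≤ len(text)
-- is exactly (text.drop i).take L.toNat (L is a Python int, always a nonnegative length here)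
def pvWindows (text : List Char) (keys : PySem.Set (List Char)) (L : Int)
    (present : PySem.Set (List Char)) : PySem.Set (List Char) :=
  (List.range (text.length + 1 - L.toNat)).foldl
    (fun present i =>
      if PySem.Set.contains keys ((text.drop i).take L.toNat)
      then PySem.Set.add present ((text.drop i).take L.toNat) else present)
    present

def check_must_not_contain_alt (forbidden : List String) (response : String) : Bool × String :=
  if forbidden.isEmpty then (true, "")
  else
    let text := PySem.Chars.lower response.toList
    let keys : PySem.Set (List Char) :=
      PySem.Set.ofList (forbidden.map (fun p => PySem.Chars.lower p.toList))
    let lengths : PySem.Set Int := PySem.Set.ofList (keys.map (fun k => (k.length : Int)))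
    let present := lengths.foldl (fun present L => pvWindows text keys L present) PySem.Set.empty
    let found := forbidden.filter (fun p => PySem.Set.contains present (PySem.Chars.lower p.toList))
    if !found.isEmpty then (false, pvFoundMsg found) else (true, "")

-- ===== PRECONDITION & SPEC =====
def Spec_check_must_not_contain (forbidden : List String) (response : String) (out : Bool × String) : Prop := out = check_must_not_contain_alt forbidden response
instance (forbidden : List String) (response : String) (out : Bool × String) : Decidable (Spec_check_must_not_contain forbidden response out) := by unfold Spec_check_must_not_contain; infer_instance

-- ===== CLAIM (what is proved, stated in full; the proofs are below) =====
def Claim_equal_check_must_not_contain : Prop := ∀ (forbidden : List String) (response : String), Dom_check_must_not_contain forbidden response → Spec_check_must_not_contain forbidden response (check_must_not_contain forbidden response)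

-- ===== LEMMAS AND PROOFS =====

-- membership in a "for x in l: if p(x): s.add(f(x))" loop
lemma pv_mem_foldl_add {α β : Type} [BEq β] [LawfulBEq β] (l : List α) (p : α → Bool)
    (f : α → β) (s : PySem.Set β) (y : β) :
    (y ∈ l.foldl (fun s x => if p x then PySem.Set.add s (f x) else s) s)
      ↔ (y ∈ s ∨ ∃ x ∈ l, p x ∧ f x = y) := by
  induction l generalizing s with
  | nil => simp
  | cons a t ih =>
    simp only [List.foldl_cons]
    by_cases hp : p a
    · rw [ih]
      simp only [hp, if_pos, PySem.Set.mem_add]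
      constructor
      · rintro (⟨h | h⟩ | h)
        · exact Or.inl h
        · exact Or.inr ⟨a, by simp [hp, h.symm]⟩
        · rcases h with ⟨x, hx, hpx, hfx⟩; exact Or.inr ⟨x, by simp [hx, hpx, hfx]⟩
      · rintro (h | ⟨x, hx, hpx, hfx⟩)
        · exact Or.inl (Or.inl h)
        · rcases List.mem_cons.mp hx with rfl | hxt
          · exact Or.inl (Or.inr hfx.symm)
          · exact Or.inr ⟨x, hxt, hpx, hfx⟩
    · rw [if_neg hp, ih]
      constructor
      · rintro (h | h)
        · exact Or.inl h
        · rcases h with ⟨x, hx, hpx, hfx⟩; exact Or.inr ⟨x, List.mem_cons_of_mem _ hx, hpx, hfx⟩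
      · rintro (h | ⟨x, hx, hpx, hfx⟩)
        · exact Or.inl h
        · rcases List.mem_cons.mp hx with rfl | hxt
          · exact absurd hpx hp
          · exact Or.inr ⟨x, hxt, hpx, hfx⟩

-- membership in the whole "for L in lengths: slide" nest
lemma pv_mem_present (text : List Char) (keys : PySem.Set (List Char)) (Ls : List Int)
    (s : PySem.Set (List Char)) (y : List Char) :
    (y ∈ Ls.foldl (fun present L => pvWindows text keys L present) s)
      ↔ (y ∈ s ∨ ∃ L ∈ Ls, ∃ i ∈ List.range (text.length + 1 - L.toNat),
          PySem.Set.contains keys ((text.drop i).take L.toNat)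
            ∧ (text.drop i).take L.toNat = y) := by
  induction Ls generalizing s with
  | nil => simp
  | cons L t ih =>
    simp only [List.foldl_cons]
    rw [ih]
    unfold pvWindows
    rw [pv_mem_foldl_add]
    constructor
    · rintro ((h | h) | h)
      · exact Or.inl h
      · rcases h with ⟨i, hi, hk, hw⟩; exact Or.inr ⟨L, List.mem_cons_self, i, hi, hk, hw⟩
      · rcases h with ⟨L', hL', rest⟩; exact Or.inr ⟨L', List.mem_cons_of_mem _ hL', rest⟩
    · rintro (h | ⟨L', hL', i, hi, hk, hw⟩)
      · exact Or.inl (Or.inl h)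
      · rcases List.mem_cons.mp hL' with rfl | hLt
        · exact Or.inl (Or.inr ⟨i, hi, hk, hw⟩)
        · exact Or.inr ⟨L', hLt, i, hi, hk, hw⟩

-- a lowered phrase is collected by the sweep exactly when Python's "k in text" holds
lemma pv_contains_present (text : List Char) (ks : List (List Char)) (k : List Char)
    (hk : k ∈ ks) :
    PySem.Set.contains
      ((PySem.Set.ofList (List.map (fun k => (k.length : Int)) (PySem.Set.ofList ks))).foldl
        (fun present L => pvWindows text (PySem.Set.ofList ks) L present) PySem.Set.empty)
      k = PySem.Chars.isIn k text := by
  have hmemk : k ∈ PySem.Set.ofList ks := (PySem.Set.mem_ofList ks k).mpr hk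
  have hcont : ∀ (s : PySem.Set (List Char)) (y : List Char),
      PySem.Set.contains s y = true ↔ y ∈ s := by
    intro s y; simp [PySem.Set.contains]
  cases h : PySem.Chars.isIn k text with
  | true =>
    -- k occurs in text: find a window equal to k
    rcases (PySem.Chars.exists_prefix_drop_iff_isIn (sub := k) (s := text)).mpr h with ⟨j, hj⟩
    have hL : (k.length : Int) ∈ PySem.Set.ofList (List.map (fun k => (k.length : Int)) (PySem.Set.ofList ks)) := by
      rw [PySem.Set.mem_ofList]
      exact List.mem_map.mpr ⟨k, hmemk, rfl⟩
    rcases le_or_gt j text.length with hjle | hjgt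
    · have hlen : k.length ≤ text.length - j := by
        have := hj.length_le
        simpa [List.length_drop] using this
      rw [hcont]
      rw [pv_mem_present]
      refine Or.inr ⟨(k.length : Int), hL, j, ?_, ?_, ?_⟩
      · rw [List.mem_range]; omega
      · rw [hcont, Int.toNat_natCast, ← List.prefix_iff_eq_take.mp hj]
        exact hmemk
      · rw [Int.toNat_natCast, ← List.prefix_iff_eq_take.mp hj]
    · have hnil : text.drop j = [] := List.drop_eq_nil_of_le (by omega)
      have hknil : k = [] := List.prefix_nil.mp (hnil ▸ hj)
      rw [hcont, pv_mem_present]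
      refine Or.inr ⟨(k.length : Int), hL, 0, ?_, ?_, ?_⟩
      · rw [List.mem_range]; simp [hknil]
      · rw [hcont]; simpa [hknil] using hmemk
      · simp [hknil]
  | false =>
    -- k does not occur: no window of any length equals k
    rw [eq_comm]
    by_contra hcp
    have hmem : k ∈ (PySem.Set.ofList (List.map (fun k => (k.length : Int)) (PySem.Set.ofList ks))).foldl
        (fun present L => pvWindows text (PySem.Set.ofList ks) L present) PySem.Set.empty := by
      rw [← hcont]
      cases hc : PySem.Set.contains ((PySem.Set.ofList (List.map (fun k => (k.length : Int)) (PySem.Set.ofList ks))).foldl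
        (fun present L => pvWindows text (PySem.Set.ofList ks) L present) PySem.Set.empty) k
      · exact absurd hc.symm hcp
      · rfl
    rw [pv_mem_present] at hmem
    rcases hmem with hmem | ⟨L, _, i, _, _, hw⟩
    · simp [PySem.Set.empty] at hmem
    · have : k <+: text.drop i := hw ▸ List.take_prefix _ _
      have : PySem.Chars.isIn k text = true :=
        (PySem.Chars.exists_prefix_drop_iff_isIn (sub := k) (s := text)).mp ⟨i, this⟩
      simp [h] at this

-- ===== VERDICT (by name: the statement is the Claim_ definition above) =====
theorem check_must_not_contain_spec : Claim_equal_check_must_not_contain := by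
  intro forbidden response _
  unfold Spec_check_must_not_contain check_must_not_contain check_must_not_contain_alt
  by_cases hemp : forbidden.isEmpty
  · simp [hemp]
  · simp only [hemp]
    have hfilter : forbidden.filter
        (fun p => PySem.Set.contains
          ((PySem.Set.ofList (List.map (fun k => (k.length : Int))
            (PySem.Set.ofList (forbidden.map (fun p => PySem.Chars.lower p.toList))))).foldl
            (fun present L => pvWindows (PySem.Chars.lower response.toList)
              (PySem.Set.ofList (forbidden.map (fun p => PySem.Chars.lower p.toList))) L present)
            PySem.Set.empty)
          (PySem.Chars.lower p.toList))
        = forbidden.filter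
            (fun p => PySem.Chars.isIn (PySem.Chars.lower p.toList) (PySem.Chars.lower response.toList)) := by
      apply List.filter_congr
      intro p hp
      exact pv_contains_present (PySem.Chars.lower response.toList)
        (forbidden.map (fun p => PySem.Chars.lower p.toList)) (PySem.Chars.lower p.toList)
        (List.mem_map.mpr ⟨p, hp, rfl⟩)
    rw [hfilter]
    simp only [PySem.List.foldl_append_if_eq_filter]
    simp
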